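-- pv_equiv track=rewrite | github.com/GianGisin/defic | src/defic/lib/csv.py | parse
-- ===== SOURCE A (Python) =====
-- class UnevenRowError(Exception):
--     pass
--
-- def parse(lines: list[str]) -> list[list[str]]:
--     result = []
--     width = None
--     for line in lines:
--         line = line.strip("\n")
--         line = line.split(",")
--         if width and len(line) != width:
--             # RFC4180 ch2, paragraph 4, every line should have the same width
--             raise UnevenRowError("All rows need to have the same amount of elements")
--         width = len(line)
--         result.append(line)
--     return result
-- ===== SOURCE B (Python) =====
-- class UnevenRowError(Exception):
--     pass
--
-- def parse(lines: list[str]) -> list[list[str]]: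
--     result = [line.strip("\n").split(",") for line in lines]
--     if len({len(row) for row in result}) > 1:
--         raise UnevenRowError("All rows need to have the same amount of elements")
--     return result
-- ===== Notes on version B (the rewrite author's own statement) =====
-- stated objective: simpler
-- what changed: B builds the whole table eagerly with a comprehension and validates widths afterwards via a set of row lengths, instead of A's per-row running-width comparison inside the building loop.
import Mathlib
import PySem

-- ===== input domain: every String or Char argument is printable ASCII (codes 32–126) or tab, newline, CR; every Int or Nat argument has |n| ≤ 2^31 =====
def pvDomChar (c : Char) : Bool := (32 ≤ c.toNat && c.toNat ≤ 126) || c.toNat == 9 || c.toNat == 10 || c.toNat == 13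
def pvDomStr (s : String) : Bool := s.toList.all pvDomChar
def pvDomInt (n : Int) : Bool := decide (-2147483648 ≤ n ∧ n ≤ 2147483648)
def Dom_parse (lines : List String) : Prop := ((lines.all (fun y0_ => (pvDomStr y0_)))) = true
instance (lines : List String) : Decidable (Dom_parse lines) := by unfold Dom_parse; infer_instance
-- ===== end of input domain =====

-- B replaces A's per-row running-width check with build-all-rows then validate widths in a second pass (objective: simpler).
-- Where Python raises UnevenRowError, both ports return [] (those inputs lie outside Pre_parse).

-- ===== PORT A =====
-- line.strip("\n").split(","): the one step both Pythons perform on each line (',' ≠ "", so split? is some)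
def pvRow (line : String) : List String :=
  (PySem.Str.split? (PySem.Str.stripChars line "\n") ",").getD []

-- A's loop, carrying the accumulated result and the running width (None before the first line)
def parseAux : List String → List (List String) → Option Nat → List (List String)
  | [], result, _ => result
  | line :: rest, result, width =>
    let l := pvRow line
    let bad : Bool := match width with
      | none => false                                     -- 'width and …': None is falsy
      | some w => decide (w ≠ 0) && decide (l.length ≠ w)
    if bad then
      []                                                  -- raise UnevenRowError (outside Pre_parse)
    else
      parseAux rest (result ++ [l]) (some l.length)

def parse (lines : List String) : List (List String) := parseAux lines [] none

-- ===== PORT B =====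
def parse_alt (lines : List String) : List (List String) :=
  let result := lines.map pvRow
  if (PySem.Set.ofList (result.map (·.length))).length > 1 then
    []                                                    -- raise UnevenRowError (outside Pre_parse)
  else
    result

-- ===== PRECONDITION & SPEC =====
-- Pre_ admits exactly the inputs on which Python's parse returns: every line splits to the same
-- number of fields (otherwise both Pythons raise UnevenRowError).
def Pre_parse (lines : List String) : Prop :=
  ∀ a ∈ lines, ∀ b ∈ lines, (pvRow a).length = (pvRow b).length
instance (lines : List String) : Decidable (Pre_parse lines) := by unfold Pre_parse; infer_instance

def pvWitness_parse : List String := ["a,b", "c,d\n", "1,2"]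

def Spec_parse (lines : List String) (out : List (List String)) : Prop := out = parse_alt lines
instance (lines : List String) (out : List (List String)) : Decidable (Spec_parse lines out) := by unfold Spec_parse; infer_instance

-- ===== CLAIM (what is proved, stated in full; the proofs are below) =====
def Claim_equal_parse : Prop := ∀ (lines : List String), Dom_parse lines → Pre_parse lines → Spec_parse lines (parse lines)

-- ===== LEMMAS AND PROOFS =====

-- A's loop, when every remaining row's width matches the carried one, appends all rows
lemma parseAux_eq_map (lines : List String) (acc : List (List String)) (w : Option Nat)
    (hp : ∀ a ∈ lines, ∀ b ∈ lines, (pvRow a).length = (pvRow b).length)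
    (hw : ∀ l ∈ lines, w = none ∨ w = some (pvRow l).length) :
    parseAux lines acc w = acc ++ lines.map pvRow := by
  induction lines generalizing acc w with
  | nil => simp [parseAux]
  | cons line rest ih =>
    have hrec := ih (acc ++ [pvRow line]) (some (pvRow line).length)
      (fun a ha b hb => hp a (List.mem_cons_of_mem _ ha) b (List.mem_cons_of_mem _ hb))
      (fun l hl => Or.inr (by rw [hp line (by simp) l (List.mem_cons_of_mem _ hl)]))
    rcases hw line (by simp) with h | h <;> subst h <;> simp [parseAux, hrec]

-- a Nodup list whose elements are pairwise equal has at most one element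
lemma nodup_all_eq_length_le_one {α : Type} (xs : List α) (hnd : xs.Nodup)
    (h : ∀ a ∈ xs, ∀ b ∈ xs, a = b) : xs.length ≤ 1 := by
  match xs with
  | [] => simp
  | [_] => simp
  | a :: b :: rest =>
    exfalso
    have hab : a = b := h a (by simp) b (by simp)
    simp [hab] at hnd

theorem parse_spec : Claim_equal_parse := by
  intro lines _ hpre
  unfold Spec_parse parse parse_alt
  have hp : ∀ a ∈ lines, ∀ b ∈ lines, (pvRow a).length = (pvRow b).length := hpre
  rw [parseAux_eq_map lines [] none hp (fun l _ => Or.inl rfl)]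
  have hle : (PySem.Set.ofList ((lines.map pvRow).map (·.length))).length ≤ 1 := by
    apply nodup_all_eq_length_le_one _ (PySem.Set.nodup_ofList _)
    intro a ha b hb
    rw [PySem.Set.mem_ofList] at ha hb
    simp only [List.mem_map] at ha hb
    obtain ⟨ra, ⟨la, hla, rfl⟩, rfl⟩ := ha
    obtain ⟨rb, ⟨lb, hlb, rfl⟩, rfl⟩ := hb
    exact hp la hla lb hlb
  simp only [List.nil_append]
  rw [if_neg (by omega)]
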